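-- pv_equiv track=rewrite | github.com/osamaalmughanni/Jtzt.neo.private | migrate-mysql/convert.py | convert_php_datetime_format
-- ===== SOURCE A (Python) =====
-- def convert_php_datetime_format(date_format: str | None, time_format: str | None) -> str:
--     date_format = date_format or "%d.%m.%Y"
--     time_format = time_format or "%H:%M"
--
--     def replace_tokens(value: str) -> str:
--         replacements = [
--             ("%Y", "yyyy"),
--             ("%y", "yy"),
--             ("%m", "MM"),
--             ("%d", "dd"),
--             ("%H", "HH"),
--             ("%k", "H"),
--             ("%I", "hh"),
--             ("%l", "h"),
--             ("%i", "mm"),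
--             ("%M", "mm"),
--             ("%s", "ss"),
--             ("%p", "tt"),
--             ("%b", "MMM"),
--         ]
--         result = value
--         for needle, replacement in replacements:
--             result = result.replace(needle, replacement)
--         return result
--
--     combined = f"{replace_tokens(date_format)} {replace_tokens(time_format)}".strip()
--     return combined or "dd.MM.yyyy HH:mm"
-- ===== SOURCE B (Python) =====
-- # Single-pass table-driven token scanner instead of 13 sequential str.replace passes.
-- _TABLE = {
--     "%Y": "yyyy", "%y": "yy", "%m": "MM", "%d": "dd", "%H": "HH",
--     "%k": "H", "%I": "hh", "%l": "h", "%i": "mm", "%M": "mm",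
--     "%s": "ss", "%p": "tt", "%b": "MMM",
-- }
--
--
-- def convert_php_datetime_format(date_format, time_format):
--     def replace_tokens(value):
--         parts = []
--         i = 0
--         while i < len(value):
--             tok = value[i:i + 2]
--             if tok in _TABLE:
--                 parts.append(_TABLE[tok])
--                 i += 2
--             else:
--                 parts.append(value[i])
--                 i += 1
--         return "".join(parts)
--
--     combined = f"{replace_tokens(date_format or '%d.%m.%Y')} {replace_tokens(time_format or '%H:%M')}".strip()
--     return combined or "dd.MM.yyyy HH:mm"
-- ===== Notes on version B (the rewrite author's own statement) =====
-- stated objective: alternative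
-- what changed: Replaces the loop of 13 sequential full-string str.replace passes by a single left-to-right scan that looks each two-character token up in a dict and emits its Java replacement.
-- intended difference: On formats where a '%' immediately precedes a '%Y' or '%m' token (substring '%%Y' or '%%m' in the effective format), A's sequential replaces cascade (the output of one replace merges with a leftover '%' and is consumed by a later replace, e.g. '%%Y' becomes 'yyyyy'), while B keeps the literal '%' and converts the token once ('%yyyy'), which is the intended translation. — e.g. on convert_php_datetime_format(some "%%Y", none): A returns "yyyyy HH:mm", B returns "%yyyy HH:mm"
import Mathlib
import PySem

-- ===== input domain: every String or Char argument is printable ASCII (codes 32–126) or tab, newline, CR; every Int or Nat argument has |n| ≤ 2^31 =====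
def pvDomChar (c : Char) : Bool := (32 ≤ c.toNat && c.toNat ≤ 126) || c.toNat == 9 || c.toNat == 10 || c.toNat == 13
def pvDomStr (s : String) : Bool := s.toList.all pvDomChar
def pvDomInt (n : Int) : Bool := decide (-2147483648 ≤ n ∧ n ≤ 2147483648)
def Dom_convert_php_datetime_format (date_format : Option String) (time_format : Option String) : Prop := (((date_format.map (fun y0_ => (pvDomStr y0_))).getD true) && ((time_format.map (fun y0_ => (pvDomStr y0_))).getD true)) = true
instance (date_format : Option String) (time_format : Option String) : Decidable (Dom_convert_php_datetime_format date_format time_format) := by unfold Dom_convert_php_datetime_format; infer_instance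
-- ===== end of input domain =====

-- B replaces A's 13 sequential full-string replace passes with one table-driven
-- left-to-right scan; on formats containing "%%Y"/"%%m" A's replaces cascade and
-- B's single scan returns the intended translation (see D_ below).

-- ===== PORT A =====
-- the 13 (needle, replacement) pairs, in A's order
def pvReplacementsA : List (String × String) :=
  [("%Y", "yyyy"), ("%y", "yy"), ("%m", "MM"), ("%d", "dd"), ("%H", "HH"),
   ("%k", "H"), ("%I", "hh"), ("%l", "h"), ("%i", "mm"), ("%M", "mm"),
   ("%s", "ss"), ("%p", "tt"), ("%b", "MMM")]

-- A's replace_tokens: result = value; for needle, replacement in replacements: result = result.replace(...)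
def pvReplaceTokensA (value : String) : String :=
  pvReplacementsA.foldl (fun result p => PySem.Str.replace result p.1 p.2) value

def convert_php_datetime_format (date_format : Option String) (time_format : Option String) : String :=
  -- date_format or "%d.%m.%Y" / time_format or "%H:%M" (None and "" are falsy)
  let df : String := match date_format with
    | none => "%d.%m.%Y"
    | some s => if s = "" then "%d.%m.%Y" else s
  let tf : String := match time_format with
    | none => "%H:%M"
    | some s => if s = "" then "%H:%M" else s
  let combined := PySem.Str.strip (pvReplaceTokensA df ++ " " ++ pvReplaceTokensA tf)
  if combined = "" then "dd.MM.yyyy HH:mm" else combined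

-- ===== PORT B =====
-- Source B's table, keys as the two-character token strings
def pvTableB : List (List Char × List Char) :=
  [(['%','Y'], ['y','y','y','y']), (['%','y'], ['y','y']), (['%','m'], ['M','M']),
   (['%','d'], ['d','d']), (['%','H'], ['H','H']), (['%','k'], ['H']),
   (['%','I'], ['h','h']), (['%','l'], ['h']), (['%','i'], ['m','m']),
   (['%','M'], ['m','m']), (['%','s'], ['s','s']), (['%','p'], ['t','t']),
   (['%','b'], ['M','M','M'])]

-- Source B's while loop: tok = value[i:i+2]; if tok in table emit table[tok], i += 2 else emit value[i], i += 1
def pvScanB : List Char → List Char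
  | [] => []
  | [a] =>
    -- tok = value[i:i+2] is the one-character slice [a] here; table keys have length 2
    match pvTableB.lookup [a] with
    | some r => r
    | none => [a]
  | a :: b :: t =>
    -- tok = value[i:i+2] = [a, b]; on a hit emit table[tok] and advance i by 2, else emit a and advance by 1
    match pvTableB.lookup [a, b] with
    | some r => r ++ pvScanB t
    | none => a :: pvScanB (b :: t)

def pvReplaceTokensB (value : String) : String := String.ofList (pvScanB value.toList)

def convert_php_datetime_format_alt (date_format : Option String) (time_format : Option String) : String :=
  let df : String := match date_format with
    | none => "%d.%m.%Y"
    | some s => if s = "" then "%d.%m.%Y" else s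
  let tf : String := match time_format with
    | none => "%H:%M"
    | some s => if s = "" then "%H:%M" else s
  let combined := PySem.Str.strip (pvReplaceTokensB df ++ " " ++ pvReplaceTokensB tf)
  if combined = "" then "dd.MM.yyyy HH:mm" else combined

-- ===== PRECONDITION & SPEC =====
-- On formats containing "%%Y" or "%%m" (a '%' directly before a '%Y'/'%m' token; the
-- defaults are token-only, so a None/empty argument is never affected), A's sequential
-- replaces cascade (a replacement output merges with the leftover '%' and is consumed by
-- a later replace, e.g. "%%Y" -> "yyyyy"), while B keeps the literal '%' and converts the
-- token once ("%yyyy"), which is the intended translation.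
def D_convert_php_datetime_format (date_format : Option String) (time_format : Option String) : Prop :=
  (PySem.Chars.isIn ['%','%','Y'] (date_format.getD "").toList ||
   PySem.Chars.isIn ['%','%','m'] (date_format.getD "").toList ||
   PySem.Chars.isIn ['%','%','Y'] (time_format.getD "").toList ||
   PySem.Chars.isIn ['%','%','m'] (time_format.getD "").toList) = true
instance (date_format : Option String) (time_format : Option String) : Decidable (D_convert_php_datetime_format date_format time_format) := by unfold D_convert_php_datetime_format; infer_instance

def Spec_convert_php_datetime_format (date_format : Option String) (time_format : Option String) (out : String) : Prop := ¬ D_convert_php_datetime_format date_format time_format → out = convert_php_datetime_format_alt date_format time_format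
instance (date_format : Option String) (time_format : Option String) (out : String) : Decidable (Spec_convert_php_datetime_format date_format time_format out) := by unfold Spec_convert_php_datetime_format; infer_instance

def pvDiffWitness_convert_php_datetime_format : Option String × Option String := (some "%%Y", none)
def pvDiffWitnessOut_convert_php_datetime_format : String × String := ("yyyyy HH:mm", "%yyyy HH:mm")

-- ===== CLAIM (what is proved, stated in full; the proofs are below) =====
def Claim_unchanged_convert_php_datetime_format : Prop := ∀ (date_format : Option String) (time_format : Option String), Dom_convert_php_datetime_format date_format time_format → Spec_convert_php_datetime_format date_format time_format (convert_php_datetime_format date_format time_format)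
def Claim_changed_convert_php_datetime_format : Prop := Dom_convert_php_datetime_format (pvDiffWitness_convert_php_datetime_format.1) (pvDiffWitness_convert_php_datetime_format.2) ∧ D_convert_php_datetime_format (pvDiffWitness_convert_php_datetime_format.1) (pvDiffWitness_convert_php_datetime_format.2) ∧ convert_php_datetime_format (pvDiffWitness_convert_php_datetime_format.1) (pvDiffWitness_convert_php_datetime_format.2) = pvDiffWitnessOut_convert_php_datetime_format.1 ∧ convert_php_datetime_format_alt (pvDiffWitness_convert_php_datetime_format.1) (pvDiffWitness_convert_php_datetime_format.2) = pvDiffWitnessOut_convert_php_datetime_format.2 ∧ pvDiffWitnessOut_convert_php_datetime_format.1 ≠ pvDiffWitnessOut_convert_php_datetime_format.2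

def Claim_exact_convert_php_datetime_format : Prop := ∀ (date_format : Option String) (time_format : Option String), Dom_convert_php_datetime_format date_format time_format → D_convert_php_datetime_format date_format time_format → convert_php_datetime_format date_format time_format ≠ convert_php_datetime_format_alt date_format time_format

-- ===== LEMMAS AND PROOFS =====

-- the effective format string (Python's `value or default`), proof-side only
def pvEff (o : Option String) (dflt : String) : String :=
  match o with
  | none => dflt
  | some s => if s = "" then dflt else s

-- a single sequential-replace pass with the two-character needle ['%', c], structurally
def pvRep2 (c : Char) (r : List Char) : List Char → List Char
  | [] => []
  | [a] => [a]
  | a :: b :: t => if a = '%' ∧ b = c then r ++ pvRep2 c r t else a :: pvRep2 c r (b :: t)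
  termination_by l => l.length
  decreasing_by all_goals simp

lemma pvGo_spec (c : Char) (r : List Char) :
    ∀ fuel l acc, l.length ≤ fuel →
      PySem.Chars.replace.go ['%', c] r fuel l acc = acc.reverse ++ pvRep2 c r l := by
  intro fuel
  induction fuel with
  | zero =>
    intro l acc h
    have : l = [] := by cases l <;> simp_all
    subst this
    rw [PySem.Chars.replace.go]; simp [pvRep2]
  | succ f ih =>
    intro l acc h
    match l with
    | [] =>
      rw [PySem.Chars.replace.go] <;> simp [pvRep2]
    | [a] =>
      rw [PySem.Chars.replace.go]
      have hpre : List.isPrefixOf ['%', c] [a] = false := by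
        simp [List.isPrefixOf]
      rw [hpre]
      simp only [Bool.false_eq_true, if_false]
      rw [ih [] (a :: acc) (by simp)]
      simp [pvRep2]
    | a :: b :: t =>
      rw [PySem.Chars.replace.go]
      by_cases hab : a = '%' ∧ b = c
      · obtain ⟨ha, hb⟩ := hab
        have hpre : List.isPrefixOf ['%', c] (a :: b :: t) = true := by
          simp [List.isPrefixOf, ha, hb]
        rw [hpre]
        simp only [if_true]
        rw [ih _ _ (by simp at h ⊢; omega)]
        rw [pvRep2]
        simp [ha, hb]
      · have hpre : List.isPrefixOf ['%', c] (a :: b :: t) = false := by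
          rcases not_and_or.mp hab with hna | hnb
          · simp [List.isPrefixOf]; intro h'; exact absurd h'.symm hna
          · simp [List.isPrefixOf]; intro _ h'; exact absurd h'.symm hnb
        rw [hpre]
        simp only [Bool.false_eq_true, if_false]
        rw [ih (b :: t) (a :: acc) (by simp at h ⊢; omega)]
        rw [pvRep2]
        simp [hab]

lemma pvReplace_eq (c : Char) (r s : List Char) :
    PySem.Chars.replace s ['%', c] r = pvRep2 c r s := by
  unfold PySem.Chars.replace
  rw [if_neg (by simp)]
  rw [pvGo_spec c r s.length s [] le_rfl]
  simp

-- the generic token scanner with a (second-char, replacement) table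
def pvScanT (L : List (Char × List Char)) : List Char → List Char
  | [] => []
  | [a] => [a]
  | a :: b :: t =>
    if a = '%' then
      match L.lookup b with
      | some r => r ++ pvScanT L t
      | none => a :: pvScanT L (b :: t)
    else a :: pvScanT L (b :: t)
  termination_by l => l.length
  decreasing_by all_goals simp

lemma pvScanT_nil_table (l : List Char) : pvScanT [] l = l := by
  suffices h : ∀ n l, List.length l ≤ n → pvScanT ([] : List (Char × List Char)) l = l from
    h l.length l le_rfl
  intro n
  induction n with
  | zero =>
    intro l h
    have : l = [] := by cases l <;> simp_all
    subst this; simp [pvScanT]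
  | succ n ih =>
    intro l h
    match l with
    | [] => simp [pvScanT]
    | [a] => simp [pvScanT]
    | a :: b :: t =>
      rw [pvScanT]
      by_cases ha : a = '%' <;>
        simp [ha, List.lookup, ih (b :: t) (by simp at h ⊢; omega)]

lemma pvRep2_cons_ne (c : Char) (r : List Char) (a : Char) (l : List Char) (ha : a ≠ '%') :
    pvRep2 c r (a :: l) = a :: pvRep2 c r l := by
  cases l with
  | nil => simp [pvRep2]
  | cons b t => rw [pvRep2]; simp [ha]

lemma pvRep2_tok (c : Char) (r : List Char) (t : List Char) :
    pvRep2 c r ('%' :: c :: t) = r ++ pvRep2 c r t := by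
  rw [pvRep2]; simp

lemma pvRep2_pct_ne (c : Char) (r : List Char) (b : Char) (t : List Char) (hb : b ≠ c) :
    pvRep2 c r ('%' :: b :: t) = '%' :: pvRep2 c r (b :: t) := by
  rw [pvRep2]; simp [hb]

lemma pvScanT_cons_ne (L : List (Char × List Char)) (a : Char) (l : List Char) (ha : a ≠ '%') :
    pvScanT L (a :: l) = a :: pvScanT L l := by
  cases l with
  | nil => simp [pvScanT]
  | cons b t => rw [pvScanT]; simp [ha]

lemma pvScanT_tok (L : List (Char × List Char)) (b : Char) (r : List Char) (t : List Char)
    (hlk : L.lookup b = some r) : pvScanT L ('%' :: b :: t) = r ++ pvScanT L t := by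
  rw [pvScanT]; simp [hlk]

lemma pvScanT_pct_none (L : List (Char × List Char)) (b : Char) (t : List Char)
    (hlk : L.lookup b = none) : pvScanT L ('%' :: b :: t) = '%' :: pvScanT L (b :: t) := by
  rw [pvScanT]; simp [hlk]

lemma pvScanT_append_clean (L : List (Char × List Char)) (l z : List Char)
    (hl : ∀ x ∈ l, x ≠ '%') : pvScanT L (l ++ z) = l ++ pvScanT L z := by
  induction l with
  | nil => simp
  | cons a l' ih =>
    have ha : a ≠ '%' := hl a (by simp)
    rw [List.cons_append, pvScanT_cons_ne L a (l' ++ z) ha,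
        ih (fun x hx => hl x (by simp [hx]))]
    simp

lemma pvInfix_of_suffix {p l : List Char} (a : Char) (h : p <:+: l) : p <:+: a :: l :=
  h.trans (List.suffix_cons a l).isInfix

lemma pvInfixClean (w l z : List Char) (hl : ∀ x ∈ l, x ≠ '%')
    (h : ('%' :: w) <:+: (l ++ z)) : ('%' :: w) <:+: z := by
  induction l with
  | nil => simpa using h
  | cons a l' ih =>
    rcases List.infix_cons_iff.mp h with hpre | hinf
    · rcases List.cons_prefix_cons.mp hpre with ⟨ha, _⟩
      exact absurd ha.symm (hl a (by simp))
    · exact ih (fun x hx => hl x (by simp [hx])) hinf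

-- the step lemma: scanning the result of one sequential replace = scanning with the token added
lemma pvStep (c : Char) (r : List Char) (L : List (Char × List Char))
    (hc : c ≠ '%') (hr : r ≠ []) (hrp : ∀ x ∈ r, x ≠ '%')
    (hL : L.lookup '%' = none) :
    ∀ n s, s.length ≤ n →
      (L.lookup r.headI = none ∨ ¬ (['%','%',c] <:+: s)) →
      pvScanT L (pvRep2 c r s) = pvScanT ((c, r) :: L) s := by
  have hpc : (('%' : Char) == c) = false := by
    rw [beq_eq_false_iff_ne]; exact Ne.symm hc
  have hL' : List.lookup '%' ((c, r) :: L) = none := by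
    simp [List.lookup, hpc, hL]
  have hlkself : List.lookup c ((c, r) :: L) = some r := by simp [List.lookup]
  intro n
  induction n with
  | zero =>
    intro s h _
    have : s = [] := by cases s <;> simp_all
    subst this; simp [pvRep2, pvScanT]
  | succ n ih =>
    intro s hlen hsafe
    match s with
    | [] => simp [pvRep2, pvScanT]
    | [a] => simp [pvRep2, pvScanT]
    | a :: b :: t =>
      have hsafet : (L.lookup r.headI = none ∨ ¬ (['%','%',c] <:+: t)) := by
        rcases hsafe with h | h
        · exact Or.inl h
        · exact Or.inr (fun h' => h (pvInfix_of_suffix a (pvInfix_of_suffix b h')))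
      have hsafebt : (L.lookup r.headI = none ∨ ¬ (['%','%',c] <:+: (b :: t))) := by
        rcases hsafe with h | h
        · exact Or.inl h
        · exact Or.inr (fun h' => h (pvInfix_of_suffix a h'))
      by_cases ha : a = '%'
      · subst ha
        by_cases hb : b = c
        · subst hb
          rw [pvRep2_tok, pvScanT_append_clean L r (pvRep2 b r t) hrp,
              ih t (by simp at hlen ⊢; omega) hsafet, pvScanT_tok _ _ _ _ hlkself]
        · rw [pvRep2_pct_ne c r b t hb]
          by_cases hbp : b = '%'
          · subst hbp
            -- s = '%' :: '%' :: t
            match t with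
            | [] =>
              have h1 : pvRep2 c r ['%'] = ['%'] := by simp [pvRep2]
              rw [h1, pvScanT_pct_none L '%' [] hL,
                  pvScanT_pct_none ((c, r) :: L) '%' [] hL']
              simp [pvScanT]
            | d :: t' =>
              by_cases hd : d = c
              · subst hd
                -- s = %%d…, so the infix disjunct is impossible: safety gives the lookup fact
                have hlook : L.lookup r.headI = none := by
                  rcases hsafe with h | h
                  · exact h
                  · exact absurd (show ['%', '%', d] <:+: ('%' :: '%' :: d :: t') by
                      exact ⟨[], t', by simp⟩) h
                obtain ⟨r0, rr, hr0⟩ : ∃ r0 rr, r = r0 :: rr := by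
                  cases r with
                  | nil => exact absurd rfl hr
                  | cons x xs => exact ⟨x, xs, rfl⟩
                subst hr0
                rw [pvRep2_tok]
                have hlook0 : List.lookup r0 L = none := hlook
                calc pvScanT L ('%' :: (r0 :: rr ++ pvRep2 d (r0 :: rr) t'))
                    = '%' :: pvScanT L (r0 :: rr ++ pvRep2 d (r0 :: rr) t') := by
                      rw [show ('%' :: (r0 :: rr ++ pvRep2 d (r0 :: rr) t')) =
                            ('%' :: r0 :: (rr ++ pvRep2 d (r0 :: rr) t')) by simp]
                      rw [pvScanT_pct_none L r0 (rr ++ pvRep2 d (r0 :: rr) t') hlook0]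
                      simp
                  _ = '%' :: (r0 :: rr) ++ pvScanT L (pvRep2 d (r0 :: rr) t') := by
                      rw [pvScanT_append_clean L (r0 :: rr) _ hrp]; simp
                  _ = '%' :: (r0 :: rr) ++ pvScanT ((d, r0 :: rr) :: L) t' := by
                      rw [ih t' (by simp at hlen ⊢; omega) (Or.inl hlook)]
                  _ = pvScanT ((d, r0 :: rr) :: L) ('%' :: '%' :: d :: t') := by
                      rw [pvScanT_pct_none ((d, r0 :: rr) :: L) '%' (d :: t') hL',
                          pvScanT_tok _ _ _ _ hlkself]
                      simp
              · -- s = '%' :: '%' :: d :: t', d ≠ c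
                rw [pvRep2_pct_ne c r d t' hd]
                have hne : pvRep2 c r (d :: t') = pvRep2 c r (d :: t') := rfl
                calc pvScanT L ('%' :: '%' :: pvRep2 c r (d :: t'))
                    = '%' :: pvScanT L ('%' :: pvRep2 c r (d :: t')) := by
                      cases hh : pvRep2 c r (d :: t') with
                      | nil => simp [pvScanT, List.lookup, hL]
                      | cons e u => exact pvScanT_pct_none L '%' (e :: u) hL
                  _ = '%' :: pvScanT L (pvRep2 c r ('%' :: d :: t')) := by
                      rw [pvRep2_pct_ne c r d t' hd]
                  _ = '%' :: pvScanT ((c, r) :: L) ('%' :: d :: t') := by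
                      rw [ih ('%' :: d :: t') (by simp at hlen ⊢; omega) (by
                        rcases hsafe with h | h
                        · exact Or.inl h
                        · exact Or.inr (fun h' => h (pvInfix_of_suffix '%' h')))]
                  _ = pvScanT ((c, r) :: L) ('%' :: '%' :: d :: t') := by
                      rw [pvScanT_pct_none ((c, r) :: L) '%' (d :: t') hL']
          · -- a = '%', b ∉ {'%', c}
            have hbt : pvRep2 c r (b :: t) = b :: pvRep2 c r t :=
              pvRep2_cons_ne c r b t hbp
            rw [hbt]
            cases hlb : L.lookup b with
            | some rb =>
              have hlb' : List.lookup b ((c, r) :: L) = some rb := by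
                simp [List.lookup, hlb, (by rw [beq_eq_false_iff_ne]; exact hb :
                  (b == c) = false)]
              rw [pvScanT_tok L b rb (pvRep2 c r t) hlb,
                  ih t (by simp at hlen ⊢; omega) hsafet,
                  pvScanT_tok _ _ _ _ hlb']
            | none =>
              have hlb' : List.lookup b ((c, r) :: L) = none := by
                simp [List.lookup, hlb, (by rw [beq_eq_false_iff_ne]; exact hb :
                  (b == c) = false)]
              rw [pvScanT_pct_none L b (pvRep2 c r t) hlb, ← hbt,
                  ih (b :: t) (by simp at hlen ⊢; omega) hsafebt,
                  pvScanT_pct_none ((c, r) :: L) b t hlb']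
      · -- a ≠ '%'
        rw [pvRep2_cons_ne c r a (b :: t) ha,
            pvScanT_cons_ne L a (pvRep2 c r (b :: t)) ha,
            ih (b :: t) (by simp at hlen ⊢; omega) hsafebt,
            pvScanT_cons_ne ((c, r) :: L) a (b :: t) ha]


-- head / prefix / preservation lemmas: the two sequential passes before "%m" cannot create "%%m"
lemma pvRep2_head_m (c : Char) (r : List Char) (hr : r ≠ []) (hrm : r.headI ≠ 'm') :
    ∀ u : List Char, (pvRep2 c r u).head? = some 'm' → u.head? = some 'm' := by
  intro u h
  match u with
  | [] => simp [pvRep2] at h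
  | [a] => simpa [pvRep2] using h
  | a :: b :: t =>
    by_cases hab : a = '%' ∧ b = c
    · obtain ⟨ha, hb⟩ := hab
      subst ha; subst hb
      rw [pvRep2_tok] at h
      obtain ⟨r0, rr, hr0⟩ : ∃ r0 rr, r = r0 :: rr := by
        cases r with
        | nil => exact absurd rfl hr
        | cons x xs => exact ⟨x, xs, rfl⟩
      subst hr0
      simp at h hrm
      exact absurd h hrm
    · rw [pvRep2] at h
      simp only [hab, if_neg, not_false_iff] at h
      simp only [List.head?_cons, Option.some.injEq] at h ⊢
      exact h

lemma pvRep2_prefix_pm (c : Char) (r : List Char) (hr : r ≠ []) (hrp : ∀ x ∈ r, x ≠ '%')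
    (hrm : r.headI ≠ 'm') :
    ∀ u : List Char, ['%','m'] <+: pvRep2 c r u → ['%','m'] <+: u := by
  intro u h
  match u with
  | [] => simp [pvRep2] at h
  | [a] =>
    simp only [pvRep2] at h
    have := h.length_le
    simp at this
  | a :: b :: t =>
    by_cases hab : a = '%' ∧ b = c
    · obtain ⟨ha, hb⟩ := hab
      subst ha; subst hb
      rw [pvRep2_tok] at h
      obtain ⟨r0, rr, hr0⟩ : ∃ r0 rr, r = r0 :: rr := by
        cases r with
        | nil => exact absurd rfl hr
        | cons x xs => exact ⟨x, xs, rfl⟩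
      subst hr0
      rcases List.cons_prefix_cons.mp h with ⟨h0, _⟩
      exact absurd h0.symm (hrp r0 (by simp))
    · rw [pvRep2] at h
      simp only [hab, if_neg, not_false_iff] at h
      rcases List.cons_prefix_cons.mp h with ⟨h0, h1⟩
      subst h0
      have hhd : (pvRep2 c r (b :: t)).head? = some 'm' := by
        rcases h1 with ⟨w, hw⟩
        rw [← hw]; simp
      have := pvRep2_head_m c r hr hrm (b :: t) hhd
      simp at this
      subst this
      exact List.cons_prefix_cons.mpr ⟨rfl, List.cons_prefix_cons.mpr ⟨rfl, List.nil_prefix⟩⟩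

lemma pvPres (c : Char) (r : List Char) (hc : c ≠ '%') (hr : r ≠ [])
    (hrp : ∀ x ∈ r, x ≠ '%') (hrm : r.headI ≠ 'm') :
    ∀ n u, List.length u ≤ n →
      ['%','%','m'] <:+: pvRep2 c r u → ['%','%','m'] <:+: u := by
  intro n
  induction n with
  | zero =>
    intro u hu h
    have : u = [] := by cases u <;> simp_all
    subst this
    simp only [pvRep2] at h
    have := h.length_le
    simp at this
  | succ n ih =>
    intro u hu h
    match u with
    | [] =>
      simp only [pvRep2] at h
      have := h.length_le
      simp at this
    | [a] =>
      simp only [pvRep2] at h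
      have := h.length_le
      simp at this
    | a :: b :: t =>
      by_cases hab : a = '%' ∧ b = c
      · obtain ⟨ha, hb⟩ := hab
        subst ha
        rw [hb, pvRep2_tok] at h
        have h5 := pvInfixClean ['%','m'] r _ hrp h
        have h6 := ih t (by simp at hu ⊢; omega) h5
        exact pvInfix_of_suffix _ (pvInfix_of_suffix _ h6)
      · rw [pvRep2] at h
        simp only [hab, if_neg, not_false_iff] at h
        rcases List.infix_cons_iff.mp h with hpre | hinf
        · rcases List.cons_prefix_cons.mp hpre with ⟨h0, h1⟩
          subst h0
          have h2 := pvRep2_prefix_pm c r hr hrp hrm (b :: t) h1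
          rcases List.cons_prefix_cons.mp h2 with ⟨hb0, h3⟩
          subst hb0
          rcases h3 with ⟨w, hw⟩
          refine ⟨[], w, ?_⟩
          simp [← hw]
        · have := ih (b :: t) (by simp at hu ⊢; omega) hinf
          exact pvInfix_of_suffix _ this

-- the full token table (second char of the needle ↦ replacement), in A's order
def pvTokensT : List (Char × List Char) := [('Y', ['y','y','y','y']), ('y', ['y','y']), ('m', ['M','M']), ('d', ['d','d']), ('H', ['H','H']), ('k', ['H']), ('I', ['h','h']), ('l', ['h']), ('i', ['m','m']), ('M', ['m','m']), ('s', ['s','s']), ('p', ['t','t']), ('b', ['M','M','M'])]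

lemma pvStep' (c : Char) (r : List Char) (L : List (Char × List Char)) (s : List Char)
    (hc : c ≠ '%') (hr : r ≠ []) (hrp : ∀ x ∈ r, x ≠ '%')
    (hL : L.lookup '%' = none)
    (hsafe : L.lookup r.headI = none ∨ ¬ (['%','%',c] <:+: s)) :
    pvScanT L (pvRep2 c r s) = pvScanT ((c, r) :: L) s :=
  pvStep c r L hc hr hrp hL s.length s le_rfl hsafe

lemma pvLookupB2 (a b : Char) :
    pvTableB.lookup [a, b] = if a = '%' then pvTokensT.lookup b else none := by
  by_cases h : a = '%'
  · simp [pvTableB, pvTokensT, List.lookup, h]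
  · have hb : (a == '%') = false := by simp [h]
    simp [pvTableB, pvTokensT, List.lookup, hb, h]

lemma pvLookupB1 (a : Char) : pvTableB.lookup [a] = none := by
  simp [pvTableB, List.lookup]

lemma pvScanB_eq_scanT (l : List Char) : pvScanB l = pvScanT pvTokensT l := by
  suffices h : ∀ n l, List.length l ≤ n → pvScanB l = pvScanT pvTokensT l from
    h l.length l le_rfl
  intro n
  induction n with
  | zero =>
    intro l h
    have : l = [] := by cases l <;> simp_all
    subst this; simp [pvScanB, pvScanT]
  | succ n ih =>
    intro l h
    match l with
    | [] => simp [pvScanB, pvScanT]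
    | [a] => simp [pvScanB, pvScanT, pvLookupB1]
    | a :: b :: t =>
      rw [pvScanB, pvLookupB2]
      by_cases ha : a = '%'
      · subst ha
        cases hlk : pvTokensT.lookup b with
        | some r =>
          rw [pvScanT_tok pvTokensT b r t hlk]
          simp [hlk, ih t (by simp at h ⊢; omega)]
        | none =>
          rw [pvScanT_pct_none pvTokensT b t hlk]
          simp [hlk, ih (b :: t) (by simp at h ⊢; omega)]
      · rw [pvScanT_cons_ne pvTokensT a (b :: t) ha]
        simp [ha, ih (b :: t) (by simp at h ⊢; omega)]

lemma pvNotMem {r : List Char} (h : '%' ∉ r) : ∀ x ∈ r, x ≠ '%' :=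
  fun x hx he => h (he ▸ hx)

-- the thirteen sequential passes, innermost first
def pvF1 (s : List Char) : List Char := pvRep2 'Y' ['y','y','y','y'] (s)
def pvF2 (s : List Char) : List Char := pvRep2 'y' ['y','y'] (pvF1 s)
def pvF3 (s : List Char) : List Char := pvRep2 'm' ['M','M'] (pvF2 s)
def pvF4 (s : List Char) : List Char := pvRep2 'd' ['d','d'] (pvF3 s)
def pvF5 (s : List Char) : List Char := pvRep2 'H' ['H','H'] (pvF4 s)
def pvF6 (s : List Char) : List Char := pvRep2 'k' ['H'] (pvF5 s)
def pvF7 (s : List Char) : List Char := pvRep2 'I' ['h','h'] (pvF6 s)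
def pvF8 (s : List Char) : List Char := pvRep2 'l' ['h'] (pvF7 s)
def pvF9 (s : List Char) : List Char := pvRep2 'i' ['m','m'] (pvF8 s)
def pvF10 (s : List Char) : List Char := pvRep2 'M' ['m','m'] (pvF9 s)
def pvF11 (s : List Char) : List Char := pvRep2 's' ['s','s'] (pvF10 s)
def pvF12 (s : List Char) : List Char := pvRep2 'p' ['t','t'] (pvF11 s)
def pvF13 (s : List Char) : List Char := pvRep2 'b' ['M','M','M'] (pvF12 s)

set_option maxRecDepth 4000 in
lemma pvReplaceTokensA_toList (v : String) :
    (pvReplaceTokensA v).toList = pvF13 v.toList := by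
  simp only [pvReplaceTokensA, pvReplacementsA, List.foldl_cons, List.foldl_nil]
  simp only [PySem.Str.toList_replace]
  rw [show ("%Y" : String).toList = ['%','Y'] from rfl,
      show ("%y" : String).toList = ['%','y'] from rfl,
      show ("%m" : String).toList = ['%','m'] from rfl,
      show ("%d" : String).toList = ['%','d'] from rfl,
      show ("%H" : String).toList = ['%','H'] from rfl,
      show ("%k" : String).toList = ['%','k'] from rfl,
      show ("%I" : String).toList = ['%','I'] from rfl,
      show ("%l" : String).toList = ['%','l'] from rfl,
      show ("%i" : String).toList = ['%','i'] from rfl,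
      show ("%M" : String).toList = ['%','M'] from rfl,
      show ("%s" : String).toList = ['%','s'] from rfl,
      show ("%p" : String).toList = ['%','p'] from rfl,
      show ("%b" : String).toList = ['%','b'] from rfl]
  simp only [pvReplace_eq]
  rfl

lemma pvReplaceTokensB_toList (v : String) :
    (pvReplaceTokensB v).toList = pvScanT pvTokensT v.toList := by
  simp only [pvReplaceTokensB, pvScanB_eq_scanT]
  simp

lemma pvReplTokens_eq (v : String)
    (hY : ¬ (['%','%','Y'] <:+: v.toList)) (hm : ¬ (['%','%','m'] <:+: v.toList)) :
    pvReplaceTokensA v = pvReplaceTokensB v := by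
  have hm1 : ¬ (['%','%','m'] <:+: pvRep2 'Y' ['y','y','y','y'] v.toList) := fun h =>
    hm (pvPres 'Y' ['y','y','y','y'] (by decide) (by decide) (pvNotMem (by decide)) (by decide) _ _
      le_rfl h)
  have hm2 : ¬ (['%','%','m'] <:+: pvRep2 'y' ['y','y'] (pvRep2 'Y' ['y','y','y','y'] v.toList)) :=
    fun h => hm1 (pvPres 'y' ['y','y'] (by decide) (by decide) (pvNotMem (by decide)) (by decide) _ _
      le_rfl h)
  have hA : (pvReplaceTokensA v).toList = pvScanT pvTokensT v.toList := by
    rw [pvReplaceTokensA_toList]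
    simp only [pvF13, pvF12, pvF11, pvF10, pvF9, pvF8, pvF7, pvF6, pvF5, pvF4, pvF3, pvF2,
      pvF1]
    refine Eq.trans (pvScanT_nil_table _).symm ?_
    rw [pvStep' 'b' ['M','M','M'] [] _ (by decide) (by decide) (pvNotMem (by decide)) (by decide) (Or.inl (by decide))]
    rw [pvStep' 'p' ['t','t'] [('b', ['M','M','M'])] _ (by decide) (by decide) (pvNotMem (by decide)) (by decide) (Or.inl (by decide))]
    rw [pvStep' 's' ['s','s'] [('p', ['t','t']), ('b', ['M','M','M'])] _ (by decide) (by decide) (pvNotMem (by decide)) (by decide) (Or.inl (by decide))]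
    rw [pvStep' 'M' ['m','m'] [('s', ['s','s']), ('p', ['t','t']), ('b', ['M','M','M'])] _ (by decide) (by decide) (pvNotMem (by decide)) (by decide) (Or.inl (by decide))]
    rw [pvStep' 'i' ['m','m'] [('M', ['m','m']), ('s', ['s','s']), ('p', ['t','t']), ('b', ['M','M','M'])] _ (by decide) (by decide) (pvNotMem (by decide)) (by decide) (Or.inl (by decide))]
    rw [pvStep' 'l' ['h'] [('i', ['m','m']), ('M', ['m','m']), ('s', ['s','s']), ('p', ['t','t']), ('b', ['M','M','M'])] _ (by decide) (by decide) (pvNotMem (by decide)) (by decide) (Or.inl (by decide))]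
    rw [pvStep' 'I' ['h','h'] [('l', ['h']), ('i', ['m','m']), ('M', ['m','m']), ('s', ['s','s']), ('p', ['t','t']), ('b', ['M','M','M'])] _ (by decide) (by decide) (pvNotMem (by decide)) (by decide) (Or.inl (by decide))]
    rw [pvStep' 'k' ['H'] [('I', ['h','h']), ('l', ['h']), ('i', ['m','m']), ('M', ['m','m']), ('s', ['s','s']), ('p', ['t','t']), ('b', ['M','M','M'])] _ (by decide) (by decide) (pvNotMem (by decide)) (by decide) (Or.inl (by decide))]
    rw [pvStep' 'H' ['H','H'] [('k', ['H']), ('I', ['h','h']), ('l', ['h']), ('i', ['m','m']), ('M', ['m','m']), ('s', ['s','s']), ('p', ['t','t']), ('b', ['M','M','M'])] _ (by decide) (by decide) (pvNotMem (by decide)) (by decide) (Or.inl (by decide))]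
    rw [pvStep' 'd' ['d','d'] [('H', ['H','H']), ('k', ['H']), ('I', ['h','h']), ('l', ['h']), ('i', ['m','m']), ('M', ['m','m']), ('s', ['s','s']), ('p', ['t','t']), ('b', ['M','M','M'])] _ (by decide) (by decide) (pvNotMem (by decide)) (by decide) (Or.inl (by decide))]
    rw [pvStep' 'm' ['M','M'] [('d', ['d','d']), ('H', ['H','H']), ('k', ['H']), ('I', ['h','h']), ('l', ['h']), ('i', ['m','m']), ('M', ['m','m']), ('s', ['s','s']), ('p', ['t','t']), ('b', ['M','M','M'])] _ (by decide) (by decide) (pvNotMem (by decide)) (by decide) (Or.inr hm2)]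
    rw [pvStep' 'y' ['y','y'] [('m', ['M','M']), ('d', ['d','d']), ('H', ['H','H']), ('k', ['H']), ('I', ['h','h']), ('l', ['h']), ('i', ['m','m']), ('M', ['m','m']), ('s', ['s','s']), ('p', ['t','t']), ('b', ['M','M','M'])] _ (by decide) (by decide) (pvNotMem (by decide)) (by decide) (Or.inl (by decide))]
    rw [pvStep' 'Y' ['y','y','y','y'] [('y', ['y','y']), ('m', ['M','M']), ('d', ['d','d']), ('H', ['H','H']), ('k', ['H']), ('I', ['h','h']), ('l', ['h']), ('i', ['m','m']), ('M', ['m','m']), ('s', ['s','s']), ('p', ['t','t']), ('b', ['M','M','M'])] _ (by decide) (by decide) (pvNotMem (by decide)) (by decide) (Or.inr hY)]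
    rfl
  have hB : (pvReplaceTokensB v).toList = pvScanT pvTokensT v.toList := by
    simp only [pvReplaceTokensB, pvScanB_eq_scanT]
    simp
  exact String.toList_inj.mp (hA.trans hB.symm)


-- ===== '%'-count machinery for the tightness theorem =====
def pvPc (l : List Char) : Nat := List.count '%' l

lemma pvPc_cons (a : Char) (l : List Char) :
    pvPc (a :: l) = pvPc l + (if a = '%' then 1 else 0) := by
  simp [pvPc, List.count_cons, beq_iff_eq]

lemma pvPc_append (l z : List Char) : pvPc (l ++ z) = pvPc l + pvPc z := by
  simp [pvPc, List.count_append]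

lemma pvPc_clean {l : List Char} (h : '%' ∉ l) : pvPc l = 0 :=
  List.count_eq_zero.mpr h

lemma pvLookup_clean {L : List (Char × List Char)} (hV : ∀ p ∈ L, '%' ∉ p.2)
    {b : Char} {r : List Char} (h : L.lookup b = some r) : '%' ∉ r := by
  induction L with
  | nil => simp [List.lookup] at h
  | cons p Lt ih =>
    obtain ⟨k, v⟩ := p
    by_cases hb : (b == k) = true
    · have hv : v = r := by simpa [List.lookup, hb] using h
      exact hv ▸ hV (k, v) (by simp)
    · have h' : List.lookup b Lt = some r := by simpa [List.lookup, hb] using h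
      exact ih (fun q hq => hV q (by simp [hq])) h'

lemma pvNotMem_tail {a : Char} {l : List Char} (h : '%' ∉ a :: l) : '%' ∉ l :=
  fun hx => h (by simp [hx])

-- one sequential pass never increases the number of '%' left by the scanner
lemma pvStepLe (c : Char) (r : List Char) (L : List (Char × List Char))
    (hc : c ≠ '%') (hr : r ≠ []) (hrp : '%' ∉ r)
    (hL : L.lookup '%' = none) (hV : ∀ p ∈ L, '%' ∉ p.2) :
    ∀ n s, s.length ≤ n →
      pvPc (pvScanT L (pvRep2 c r s)) ≤ pvPc (pvScanT ((c, r) :: L) s) := by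
  have hpc : (('%' : Char) == c) = false := by
    rw [beq_eq_false_iff_ne]; exact Ne.symm hc
  have hL' : List.lookup '%' ((c, r) :: L) = none := by
    simp [List.lookup, hpc, hL]
  have hlkself : List.lookup c ((c, r) :: L) = some r := by simp [List.lookup]
  intro n
  induction n with
  | zero =>
    intro s h
    have : s = [] := by cases s <;> simp_all
    subst this; simp [pvRep2, pvScanT]
  | succ n ih =>
    intro s hlen
    match s with
    | [] => simp [pvRep2, pvScanT]
    | [a] => simp [pvRep2, pvScanT]

    | a :: b :: t =>
      by_cases ha : a = '%'
      · subst ha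
        by_cases hb : b = c
        · rw [hb, pvRep2_tok, pvScanT_append_clean L r (pvRep2 c r t) (pvNotMem hrp),
              pvScanT_tok _ _ _ _ hlkself, pvPc_append, pvPc_append]
          exact Nat.add_le_add_left (ih t (by simp at hlen ⊢; omega)) _
        · rw [pvRep2_pct_ne c r b t hb]
          by_cases hbp : b = '%'
          · subst hbp
            match t with
            | [] =>
              have h1 : pvRep2 c r ['%'] = ['%'] := by simp [pvRep2]
              rw [h1, pvScanT_pct_none L '%' [] hL,
                  pvScanT_pct_none ((c, r) :: L) '%' [] hL']
              simp [pvScanT]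
            | d :: t' =>
              by_cases hd : d = c
              · obtain ⟨r0, rr, hr0⟩ : ∃ r0 rr, r = r0 :: rr := by
                  cases r with
                  | nil => exact absurd rfl hr
                  | cons x xs => exact ⟨x, xs, rfl⟩
                subst hr0
                rw [hd, pvRep2_tok]
                have hRHS : pvScanT ((c, r0 :: rr) :: L) ('%' :: '%' :: c :: t') =
                    '%' :: ((r0 :: rr) ++ pvScanT ((c, r0 :: rr) :: L) t') := by
                  rw [pvScanT_pct_none ((c, r0 :: rr) :: L) '%' (c :: t') hL',
                      pvScanT_tok _ _ _ _ hlkself]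
                rw [hRHS]
                cases hlk : L.lookup r0 with
                | none =>
                  have hstep : pvScanT L ('%' :: (r0 :: rr ++ pvRep2 c (r0 :: rr) t')) =
                      '%' :: pvScanT L (r0 :: (rr ++ pvRep2 c (r0 :: rr) t')) :=
                    pvScanT_pct_none L r0 (rr ++ pvRep2 c (r0 :: rr) t') hlk
                  rw [show ('%' :: (r0 :: rr ++ pvRep2 c (r0 :: rr) t')) =
                        ('%' :: r0 :: (rr ++ pvRep2 c (r0 :: rr) t')) by simp] at hstep ⊢
                  rw [hstep,
                      show (r0 : Char) :: (rr ++ pvRep2 c (r0 :: rr) t') =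
                        (r0 :: rr) ++ pvRep2 c (r0 :: rr) t' by simp,
                      pvScanT_append_clean L (r0 :: rr) _ (pvNotMem hrp)]
                  simp only [pvPc_cons, pvPc_append, pvPc_clean hrp, reduceIte]
                  have := ih t' (by simp at hlen ⊢; omega)
                  omega
                | some rv =>
                  have hstep : pvScanT L ('%' :: (r0 :: rr ++ pvRep2 c (r0 :: rr) t')) =
                      rv ++ pvScanT L (rr ++ pvRep2 c (r0 :: rr) t') := by
                    rw [show ('%' :: (r0 :: rr ++ pvRep2 c (r0 :: rr) t')) =
                          ('%' :: r0 :: (rr ++ pvRep2 c (r0 :: rr) t')) by simp]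
                    exact pvScanT_tok L r0 rv (rr ++ pvRep2 c (r0 :: rr) t') hlk
                  rw [hstep,
                      pvScanT_append_clean L rr _ (pvNotMem (pvNotMem_tail hrp))]
                  simp only [pvPc_cons, pvPc_append, pvPc_clean (pvLookup_clean hV hlk),
                    pvPc_clean (pvNotMem_tail hrp), pvPc_clean hrp, reduceIte]
                  have := ih t' (by simp at hlen ⊢; omega)
                  omega
              · rw [pvRep2_pct_ne c r d t' hd]
                have hLHS : pvScanT L ('%' :: '%' :: pvRep2 c r (d :: t')) =
                    '%' :: pvScanT L ('%' :: pvRep2 c r (d :: t')) := by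
                  cases hh : pvRep2 c r (d :: t') with
                  | nil => simp [pvScanT, List.lookup, hL]
                  | cons e u => exact pvScanT_pct_none L '%' (e :: u) hL
                rw [hLHS, show ('%' : Char) :: pvRep2 c r (d :: t') =
                      pvRep2 c r ('%' :: d :: t') by rw [pvRep2_pct_ne c r d t' hd],
                    pvScanT_pct_none ((c, r) :: L) '%' (d :: t') hL']
                simp only [pvPc_cons, reduceIte]
                have := ih ('%' :: d :: t') (by simp at hlen ⊢; omega)
                omega
          · have hbt : pvRep2 c r (b :: t) = b :: pvRep2 c r t :=
              pvRep2_cons_ne c r b t hbp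
            have hbc : (b == c) = false := by rw [beq_eq_false_iff_ne]; exact hb
            rw [hbt]
            cases hlb : L.lookup b with
            | some rb =>
              have hlb' : List.lookup b ((c, r) :: L) = some rb := by
                simp [List.lookup, hbc, hlb]
              rw [pvScanT_tok L b rb (pvRep2 c r t) hlb, pvScanT_tok _ _ _ _ hlb',
                  pvPc_append, pvPc_append]
              exact Nat.add_le_add_left (ih t (by simp at hlen ⊢; omega)) _
            | none =>
              have hlb' : List.lookup b ((c, r) :: L) = none := by
                simp [List.lookup, hbc, hlb]
              rw [pvScanT_pct_none L b (pvRep2 c r t) hlb, ← hbt,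
                  pvScanT_pct_none ((c, r) :: L) b t hlb', pvPc_cons, pvPc_cons]
              have := ih (b :: t) (by simp at hlen ⊢; omega)
              omega
      · rw [pvRep2_cons_ne c r a (b :: t) ha,
            pvScanT_cons_ne L a (pvRep2 c r (b :: t)) ha,
            pvScanT_cons_ne ((c, r) :: L) a (b :: t) ha, pvPc_cons, pvPc_cons]
        have := ih (b :: t) (by simp at hlen ⊢; omega)
        omega

-- when the input contains "%%c" and the head of the replacement starts a later token,
-- the sequential pass cascades and strictly fewer '%' survive
lemma pvStepLt (c : Char) (r : List Char) (L : List (Char × List Char))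
    (hc : c ≠ '%') (hr : r ≠ []) (hrp : '%' ∉ r)
    (hL : L.lookup '%' = none) (hV : ∀ p ∈ L, '%' ∉ p.2)
    (hM : (L.lookup r.headI).isSome = true) :
    ∀ n s, s.length ≤ n → ['%','%',c] <:+: s →
      pvPc (pvScanT L (pvRep2 c r s)) < pvPc (pvScanT ((c, r) :: L) s) := by
  have hpc : (('%' : Char) == c) = false := by
    rw [beq_eq_false_iff_ne]; exact Ne.symm hc
  have hL' : List.lookup '%' ((c, r) :: L) = none := by
    simp [List.lookup, hpc, hL]
  have hlkself : List.lookup c ((c, r) :: L) = some r := by simp [List.lookup]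
  intro n
  induction n with
  | zero =>
    intro s h hbad
    have : s = [] := by cases s <;> simp_all
    subst this
    have := hbad.length_le
    simp at this
  | succ n ih =>
    intro s hlen hbad
    match s with
    | [] =>
      have := hbad.length_le
      simp at this
    | [a] =>
      have := hbad.length_le
      simp at this
    | a :: b :: t =>
      by_cases ha : a = '%'
      · subst ha
        by_cases hb : b = c
        · have hbadt : ['%','%',c] <:+: t := by
            rcases List.infix_cons_iff.mp hbad with hpre | hinf
            · rcases List.cons_prefix_cons.mp hpre with ⟨_, h1⟩
              rcases List.cons_prefix_cons.mp h1 with ⟨h2, _⟩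
              exact absurd (h2.trans hb).symm hc
            · rcases List.infix_cons_iff.mp hinf with hpre | hinf2
              · rcases List.cons_prefix_cons.mp hpre with ⟨h2, _⟩
                exact absurd (hb ▸ h2).symm hc
              · exact hinf2
          rw [hb, pvRep2_tok, pvScanT_append_clean L r (pvRep2 c r t) (pvNotMem hrp),
              pvScanT_tok _ _ _ _ hlkself, pvPc_append, pvPc_append]
          exact Nat.add_lt_add_left (ih t (by simp at hlen ⊢; omega) hbadt) _
        · rw [pvRep2_pct_ne c r b t hb]
          by_cases hbp : b = '%'
          · subst hbp
            match t with
            | [] =>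
              have := hbad.length_le
              simp at this
            | d :: t' =>
              by_cases hd : d = c
              · obtain ⟨r0, rr, hr0⟩ : ∃ r0 rr, r = r0 :: rr := by
                  cases r with
                  | nil => exact absurd rfl hr
                  | cons x xs => exact ⟨x, xs, rfl⟩
                subst hr0
                obtain ⟨rv, hlk⟩ : ∃ rv, L.lookup r0 = some rv := by
                  cases hlkv : L.lookup r0 with
                  | none => rw [show (List.headI (r0 :: rr)) = r0 from rfl, hlkv] at hM; simp at hM
                  | some rv => exact ⟨rv, rfl⟩
                rw [hd, pvRep2_tok]
                have hRHS : pvScanT ((c, r0 :: rr) :: L) ('%' :: '%' :: c :: t') =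
                    '%' :: ((r0 :: rr) ++ pvScanT ((c, r0 :: rr) :: L) t') := by
                  rw [pvScanT_pct_none ((c, r0 :: rr) :: L) '%' (c :: t') hL',
                      pvScanT_tok _ _ _ _ hlkself]
                rw [hRHS]
                have hstep : pvScanT L ('%' :: (r0 :: rr ++ pvRep2 c (r0 :: rr) t')) =
                    rv ++ pvScanT L (rr ++ pvRep2 c (r0 :: rr) t') := by
                  rw [show ('%' :: (r0 :: rr ++ pvRep2 c (r0 :: rr) t')) =
                        ('%' :: r0 :: (rr ++ pvRep2 c (r0 :: rr) t')) by simp]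
                  exact pvScanT_tok L r0 rv (rr ++ pvRep2 c (r0 :: rr) t') hlk
                rw [hstep,
                    pvScanT_append_clean L rr _ (pvNotMem (pvNotMem_tail hrp))]
                simp only [pvPc_cons, pvPc_append, pvPc_clean (pvLookup_clean hV hlk),
                  pvPc_clean (pvNotMem_tail hrp), pvPc_clean hrp, reduceIte]
                have := pvStepLe c (r0 :: rr) L hc hr hrp hL hV t'.length t' le_rfl
                omega
              · have hbad' : ['%','%',c] <:+: ('%' :: d :: t') := by
                  rcases List.infix_cons_iff.mp hbad with hpre | hinf
                  · rcases List.cons_prefix_cons.mp hpre with ⟨_, h1⟩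
                    rcases List.cons_prefix_cons.mp h1 with ⟨_, h2⟩
                    rcases List.cons_prefix_cons.mp h2 with ⟨h3, _⟩
                    exact absurd h3.symm hd
                  · exact hinf
                rw [pvRep2_pct_ne c r d t' hd]
                have hLHS : pvScanT L ('%' :: '%' :: pvRep2 c r (d :: t')) =
                    '%' :: pvScanT L ('%' :: pvRep2 c r (d :: t')) := by
                  cases hh : pvRep2 c r (d :: t') with
                  | nil => simp [pvScanT, List.lookup, hL]
                  | cons e u => exact pvScanT_pct_none L '%' (e :: u) hL
                rw [hLHS, show ('%' : Char) :: pvRep2 c r (d :: t') =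
                      pvRep2 c r ('%' :: d :: t') by rw [pvRep2_pct_ne c r d t' hd],
                    pvScanT_pct_none ((c, r) :: L) '%' (d :: t') hL']
                simp only [pvPc_cons, reduceIte]
                have := ih ('%' :: d :: t') (by simp at hlen ⊢; omega) hbad'
                omega
          · have hbadbt : ['%','%',c] <:+: (b :: t) := by
              rcases List.infix_cons_iff.mp hbad with hpre | hinf
              · rcases List.cons_prefix_cons.mp hpre with ⟨_, h1⟩
                rcases List.cons_prefix_cons.mp h1 with ⟨h2, _⟩
                exact absurd h2.symm hbp
              · exact hinf
            have hbadt : ['%','%',c] <:+: t := by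
              rcases List.infix_cons_iff.mp hbadbt with hpre | hinf
              · rcases List.cons_prefix_cons.mp hpre with ⟨h2, _⟩
                exact absurd h2.symm hbp
              · exact hinf
            have hbt : pvRep2 c r (b :: t) = b :: pvRep2 c r t :=
              pvRep2_cons_ne c r b t hbp
            have hbc : (b == c) = false := by rw [beq_eq_false_iff_ne]; exact hb
            rw [hbt]
            cases hlb : L.lookup b with
            | some rb =>
              have hlb' : List.lookup b ((c, r) :: L) = some rb := by
                simp [List.lookup, hbc, hlb]
              rw [pvScanT_tok L b rb (pvRep2 c r t) hlb, pvScanT_tok _ _ _ _ hlb',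
                  pvPc_append, pvPc_append]
              exact Nat.add_lt_add_left (ih t (by simp at hlen ⊢; omega) hbadt) _
            | none =>
              have hlb' : List.lookup b ((c, r) :: L) = none := by
                simp [List.lookup, hbc, hlb]
              rw [pvScanT_pct_none L b (pvRep2 c r t) hlb, ← hbt,
                  pvScanT_pct_none ((c, r) :: L) b t hlb', pvPc_cons, pvPc_cons]
              have := ih (b :: t) (by simp at hlen ⊢; omega) hbadbt
              omega
      · have hbadbt : ['%','%',c] <:+: (b :: t) := by
          rcases List.infix_cons_iff.mp hbad with hpre | hinf
          · rcases List.cons_prefix_cons.mp hpre with ⟨h2, _⟩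
            exact absurd h2.symm ha
          · exact hinf
        rw [pvRep2_cons_ne c r a (b :: t) ha,
            pvScanT_cons_ne L a (pvRep2 c r (b :: t)) ha,
            pvScanT_cons_ne ((c, r) :: L) a (b :: t) ha, pvPc_cons, pvPc_cons]
        have := ih (b :: t) (by simp at hlen ⊢; omega) hbadbt
        omega

-- a "%%m" occurrence survives the two y-passes that run before the "%m" pass
lemma pvBadmFwd (c : Char) (r : List Char) (hc1 : c ≠ '%') (hc2 : c ≠ 'm') :
    ∀ n u, List.length u ≤ n →
      ['%','%','m'] <:+: u → ['%','%','m'] <:+: pvRep2 c r u := by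
  intro n
  induction n with
  | zero =>
    intro u hu h
    have : u = [] := by cases u <;> simp_all
    subst this
    have := h.length_le
    simp at this
  | succ n ih =>
    intro u hu h
    match u with
    | [] =>
      have := h.length_le
      simp at this
    | [a] =>
      have := h.length_le
      simp at this
    | a :: b :: t =>
      by_cases hab : a = '%' ∧ b = c
      · obtain ⟨ha, hb⟩ := hab
        subst ha
        have hbt : ['%','%','m'] <:+: t := by
          rcases List.infix_cons_iff.mp h with hpre | hinf
          · rcases List.cons_prefix_cons.mp hpre with ⟨_, h1⟩
            rcases List.cons_prefix_cons.mp h1 with ⟨h2, _⟩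
            exact absurd (hb ▸ h2).symm hc1
          · rcases List.infix_cons_iff.mp hinf with hpre | hinf2
            · rcases List.cons_prefix_cons.mp hpre with ⟨h2, _⟩
              exact absurd (h2.trans hb).symm hc1
            · exact hinf2
        rw [hb, pvRep2_tok]
        exact (ih t (by simp at hu ⊢; omega) hbt).trans (List.suffix_append r _).isInfix
      · have hrw : pvRep2 c r (a :: b :: t) = a :: pvRep2 c r (b :: t) := by
          rw [pvRep2]; simp [hab]
        rw [hrw]
        rcases List.infix_cons_iff.mp h with hpre | hinf
        · -- u starts with "%%m"
          rcases List.cons_prefix_cons.mp hpre with ⟨ha, h1⟩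
          rcases List.cons_prefix_cons.mp h1 with ⟨hb, h2⟩
          subst ha; subst hb
          obtain ⟨t2, ht2⟩ : ∃ t2, t = 'm' :: t2 := by
            rcases h2 with ⟨w, hw⟩
            cases t with
            | nil => simp at hw
            | cons x xs =>
              simp at hw
              exact ⟨xs, by rw [← hw.1]⟩
          subst ht2
          have hrw2 : pvRep2 c r ('%' :: 'm' :: t2) = '%' :: 'm' :: pvRep2 c r t2 := by
            rw [pvRep2_pct_ne c r 'm' t2 (fun h' => hc2 h'.symm),
                pvRep2_cons_ne c r 'm' t2 (by decide)]
          rw [hrw2]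
          exact ⟨[], pvRep2 c r t2, by simp⟩
        · have := ih (b :: t) (by simp at hu ⊢; omega) hinf
          exact pvInfix_of_suffix a this

lemma pvPcLe13 (s : List Char) :
    pvPc (pvF13 s) ≤ pvPc (pvScanT pvTokensT s) := by
  calc pvPc (pvF13 s)
      = pvPc (pvScanT [] (pvF13 s)) := by rw [pvScanT_nil_table]
    _ ≤ pvPc (pvScanT [('b', ['M','M','M'])] (pvF12 s)) := pvStepLe 'b' ['M','M','M'] [] (by decide) (by decide) (by decide) (by decide) (by decide) (pvF12 s).length (pvF12 s) le_rfl
    _ ≤ pvPc (pvScanT [('p', ['t','t']), ('b', ['M','M','M'])] (pvF11 s)) := pvStepLe 'p' ['t','t'] [('b', ['M','M','M'])] (by decide) (by decide) (by decide) (by decide) (by decide) (pvF11 s).length (pvF11 s) le_rfl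
    _ ≤ pvPc (pvScanT [('s', ['s','s']), ('p', ['t','t']), ('b', ['M','M','M'])] (pvF10 s)) := pvStepLe 's' ['s','s'] [('p', ['t','t']), ('b', ['M','M','M'])] (by decide) (by decide) (by decide) (by decide) (by decide) (pvF10 s).length (pvF10 s) le_rfl
    _ ≤ pvPc (pvScanT [('M', ['m','m']), ('s', ['s','s']), ('p', ['t','t']), ('b', ['M','M','M'])] (pvF9 s)) := pvStepLe 'M' ['m','m'] [('s', ['s','s']), ('p', ['t','t']), ('b', ['M','M','M'])] (by decide) (by decide) (by decide) (by decide) (by decide) (pvF9 s).length (pvF9 s) le_rfl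
    _ ≤ pvPc (pvScanT [('i', ['m','m']), ('M', ['m','m']), ('s', ['s','s']), ('p', ['t','t']), ('b', ['M','M','M'])] (pvF8 s)) := pvStepLe 'i' ['m','m'] [('M', ['m','m']), ('s', ['s','s']), ('p', ['t','t']), ('b', ['M','M','M'])] (by decide) (by decide) (by decide) (by decide) (by decide) (pvF8 s).length (pvF8 s) le_rfl
    _ ≤ pvPc (pvScanT [('l', ['h']), ('i', ['m','m']), ('M', ['m','m']), ('s', ['s','s']), ('p', ['t','t']), ('b', ['M','M','M'])] (pvF7 s)) := pvStepLe 'l' ['h'] [('i', ['m','m']), ('M', ['m','m']), ('s', ['s','s']), ('p', ['t','t']), ('b', ['M','M','M'])] (by decide) (by decide) (by decide) (by decide) (by decide) (pvF7 s).length (pvF7 s) le_rfl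
    _ ≤ pvPc (pvScanT [('I', ['h','h']), ('l', ['h']), ('i', ['m','m']), ('M', ['m','m']), ('s', ['s','s']), ('p', ['t','t']), ('b', ['M','M','M'])] (pvF6 s)) := pvStepLe 'I' ['h','h'] [('l', ['h']), ('i', ['m','m']), ('M', ['m','m']), ('s', ['s','s']), ('p', ['t','t']), ('b', ['M','M','M'])] (by decide) (by decide) (by decide) (by decide) (by decide) (pvF6 s).length (pvF6 s) le_rfl
    _ ≤ pvPc (pvScanT [('k', ['H']), ('I', ['h','h']), ('l', ['h']), ('i', ['m','m']), ('M', ['m','m']), ('s', ['s','s']), ('p', ['t','t']), ('b', ['M','M','M'])] (pvF5 s)) := pvStepLe 'k' ['H'] [('I', ['h','h']), ('l', ['h']), ('i', ['m','m']), ('M', ['m','m']), ('s', ['s','s']), ('p', ['t','t']), ('b', ['M','M','M'])] (by decide) (by decide) (by decide) (by decide) (by decide) (pvF5 s).length (pvF5 s) le_rfl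
    _ ≤ pvPc (pvScanT [('H', ['H','H']), ('k', ['H']), ('I', ['h','h']), ('l', ['h']), ('i', ['m','m']), ('M', ['m','m']), ('s', ['s','s']), ('p', ['t','t']), ('b', ['M','M','M'])] (pvF4 s)) := pvStepLe 'H' ['H','H'] [('k', ['H']), ('I', ['h','h']), ('l', ['h']), ('i', ['m','m']), ('M', ['m','m']), ('s', ['s','s']), ('p', ['t','t']), ('b', ['M','M','M'])] (by decide) (by decide) (by decide) (by decide) (by decide) (pvF4 s).length (pvF4 s) le_rfl
    _ ≤ pvPc (pvScanT [('d', ['d','d']), ('H', ['H','H']), ('k', ['H']), ('I', ['h','h']), ('l', ['h']), ('i', ['m','m']), ('M', ['m','m']), ('s', ['s','s']), ('p', ['t','t']), ('b', ['M','M','M'])] (pvF3 s)) := pvStepLe 'd' ['d','d'] [('H', ['H','H']), ('k', ['H']), ('I', ['h','h']), ('l', ['h']), ('i', ['m','m']), ('M', ['m','m']), ('s', ['s','s']), ('p', ['t','t']), ('b', ['M','M','M'])] (by decide) (by decide) (by decide) (by decide) (by decide) (pvF3 s).length (pvF3 s) le_rfl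
    _ ≤ pvPc (pvScanT [('m', ['M','M']), ('d', ['d','d']), ('H', ['H','H']), ('k', ['H']), ('I', ['h','h']), ('l', ['h']), ('i', ['m','m']), ('M', ['m','m']), ('s', ['s','s']), ('p', ['t','t']), ('b', ['M','M','M'])] (pvF2 s)) := pvStepLe 'm' ['M','M'] [('d', ['d','d']), ('H', ['H','H']), ('k', ['H']), ('I', ['h','h']), ('l', ['h']), ('i', ['m','m']), ('M', ['m','m']), ('s', ['s','s']), ('p', ['t','t']), ('b', ['M','M','M'])] (by decide) (by decide) (by decide) (by decide) (by decide) (pvF2 s).length (pvF2 s) le_rfl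
    _ ≤ pvPc (pvScanT [('y', ['y','y']), ('m', ['M','M']), ('d', ['d','d']), ('H', ['H','H']), ('k', ['H']), ('I', ['h','h']), ('l', ['h']), ('i', ['m','m']), ('M', ['m','m']), ('s', ['s','s']), ('p', ['t','t']), ('b', ['M','M','M'])] (pvF1 s)) := pvStepLe 'y' ['y','y'] [('m', ['M','M']), ('d', ['d','d']), ('H', ['H','H']), ('k', ['H']), ('I', ['h','h']), ('l', ['h']), ('i', ['m','m']), ('M', ['m','m']), ('s', ['s','s']), ('p', ['t','t']), ('b', ['M','M','M'])] (by decide) (by decide) (by decide) (by decide) (by decide) (pvF1 s).length (pvF1 s) le_rfl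
    _ ≤ pvPc (pvScanT pvTokensT s) := pvStepLe 'Y' ['y','y','y','y'] [('y', ['y','y']), ('m', ['M','M']), ('d', ['d','d']), ('H', ['H','H']), ('k', ['H']), ('I', ['h','h']), ('l', ['h']), ('i', ['m','m']), ('M', ['m','m']), ('s', ['s','s']), ('p', ['t','t']), ('b', ['M','M','M'])] (by decide) (by decide) (by decide) (by decide) (by decide) (s).length (s) le_rfl

lemma pvPcLt13 (s : List Char)
    (hb : ['%','%','Y'] <:+: s ∨ ['%','%','m'] <:+: s) :
    pvPc (pvF13 s) < pvPc (pvScanT pvTokensT s) := by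
  rcases hb with hbY | hbm
  · calc pvPc (pvF13 s)
      = pvPc (pvScanT [] (pvF13 s)) := by rw [pvScanT_nil_table]
    _ ≤ pvPc (pvScanT [('b', ['M','M','M'])] (pvF12 s)) := pvStepLe 'b' ['M','M','M'] [] (by decide) (by decide) (by decide) (by decide) (by decide) (pvF12 s).length (pvF12 s) le_rfl
    _ ≤ pvPc (pvScanT [('p', ['t','t']), ('b', ['M','M','M'])] (pvF11 s)) := pvStepLe 'p' ['t','t'] [('b', ['M','M','M'])] (by decide) (by decide) (by decide) (by decide) (by decide) (pvF11 s).length (pvF11 s) le_rfl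
    _ ≤ pvPc (pvScanT [('s', ['s','s']), ('p', ['t','t']), ('b', ['M','M','M'])] (pvF10 s)) := pvStepLe 's' ['s','s'] [('p', ['t','t']), ('b', ['M','M','M'])] (by decide) (by decide) (by decide) (by decide) (by decide) (pvF10 s).length (pvF10 s) le_rfl
    _ ≤ pvPc (pvScanT [('M', ['m','m']), ('s', ['s','s']), ('p', ['t','t']), ('b', ['M','M','M'])] (pvF9 s)) := pvStepLe 'M' ['m','m'] [('s', ['s','s']), ('p', ['t','t']), ('b', ['M','M','M'])] (by decide) (by decide) (by decide) (by decide) (by decide) (pvF9 s).length (pvF9 s) le_rfl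
    _ ≤ pvPc (pvScanT [('i', ['m','m']), ('M', ['m','m']), ('s', ['s','s']), ('p', ['t','t']), ('b', ['M','M','M'])] (pvF8 s)) := pvStepLe 'i' ['m','m'] [('M', ['m','m']), ('s', ['s','s']), ('p', ['t','t']), ('b', ['M','M','M'])] (by decide) (by decide) (by decide) (by decide) (by decide) (pvF8 s).length (pvF8 s) le_rfl
    _ ≤ pvPc (pvScanT [('l', ['h']), ('i', ['m','m']), ('M', ['m','m']), ('s', ['s','s']), ('p', ['t','t']), ('b', ['M','M','M'])] (pvF7 s)) := pvStepLe 'l' ['h'] [('i', ['m','m']), ('M', ['m','m']), ('s', ['s','s']), ('p', ['t','t']), ('b', ['M','M','M'])] (by decide) (by decide) (by decide) (by decide) (by decide) (pvF7 s).length (pvF7 s) le_rfl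
    _ ≤ pvPc (pvScanT [('I', ['h','h']), ('l', ['h']), ('i', ['m','m']), ('M', ['m','m']), ('s', ['s','s']), ('p', ['t','t']), ('b', ['M','M','M'])] (pvF6 s)) := pvStepLe 'I' ['h','h'] [('l', ['h']), ('i', ['m','m']), ('M', ['m','m']), ('s', ['s','s']), ('p', ['t','t']), ('b', ['M','M','M'])] (by decide) (by decide) (by decide) (by decide) (by decide) (pvF6 s).length (pvF6 s) le_rfl
    _ ≤ pvPc (pvScanT [('k', ['H']), ('I', ['h','h']), ('l', ['h']), ('i', ['m','m']), ('M', ['m','m']), ('s', ['s','s']), ('p', ['t','t']), ('b', ['M','M','M'])] (pvF5 s)) := pvStepLe 'k' ['H'] [('I', ['h','h']), ('l', ['h']), ('i', ['m','m']), ('M', ['m','m']), ('s', ['s','s']), ('p', ['t','t']), ('b', ['M','M','M'])] (by decide) (by decide) (by decide) (by decide) (by decide) (pvF5 s).length (pvF5 s) le_rfl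
    _ ≤ pvPc (pvScanT [('H', ['H','H']), ('k', ['H']), ('I', ['h','h']), ('l', ['h']), ('i', ['m','m']), ('M', ['m','m']), ('s', ['s','s']), ('p', ['t','t']), ('b', ['M','M','M'])] (pvF4 s)) := pvStepLe 'H' ['H','H'] [('k', ['H']), ('I', ['h','h']), ('l', ['h']), ('i', ['m','m']), ('M', ['m','m']), ('s', ['s','s']), ('p', ['t','t']), ('b', ['M','M','M'])] (by decide) (by decide) (by decide) (by decide) (by decide) (pvF4 s).length (pvF4 s) le_rfl
    _ ≤ pvPc (pvScanT [('d', ['d','d']), ('H', ['H','H']), ('k', ['H']), ('I', ['h','h']), ('l', ['h']), ('i', ['m','m']), ('M', ['m','m']), ('s', ['s','s']), ('p', ['t','t']), ('b', ['M','M','M'])] (pvF3 s)) := pvStepLe 'd' ['d','d'] [('H', ['H','H']), ('k', ['H']), ('I', ['h','h']), ('l', ['h']), ('i', ['m','m']), ('M', ['m','m']), ('s', ['s','s']), ('p', ['t','t']), ('b', ['M','M','M'])] (by decide) (by decide) (by decide) (by decide) (by decide) (pvF3 s).length (pvF3 s) le_rfl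
    _ ≤ pvPc (pvScanT [('m', ['M','M']), ('d', ['d','d']), ('H', ['H','H']), ('k', ['H']), ('I', ['h','h']), ('l', ['h']), ('i', ['m','m']), ('M', ['m','m']), ('s', ['s','s']), ('p', ['t','t']), ('b', ['M','M','M'])] (pvF2 s)) := pvStepLe 'm' ['M','M'] [('d', ['d','d']), ('H', ['H','H']), ('k', ['H']), ('I', ['h','h']), ('l', ['h']), ('i', ['m','m']), ('M', ['m','m']), ('s', ['s','s']), ('p', ['t','t']), ('b', ['M','M','M'])] (by decide) (by decide) (by decide) (by decide) (by decide) (pvF2 s).length (pvF2 s) le_rfl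
    _ ≤ pvPc (pvScanT [('y', ['y','y']), ('m', ['M','M']), ('d', ['d','d']), ('H', ['H','H']), ('k', ['H']), ('I', ['h','h']), ('l', ['h']), ('i', ['m','m']), ('M', ['m','m']), ('s', ['s','s']), ('p', ['t','t']), ('b', ['M','M','M'])] (pvF1 s)) := pvStepLe 'y' ['y','y'] [('m', ['M','M']), ('d', ['d','d']), ('H', ['H','H']), ('k', ['H']), ('I', ['h','h']), ('l', ['h']), ('i', ['m','m']), ('M', ['m','m']), ('s', ['s','s']), ('p', ['t','t']), ('b', ['M','M','M'])] (by decide) (by decide) (by decide) (by decide) (by decide) (pvF1 s).length (pvF1 s) le_rfl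
    _ < pvPc (pvScanT pvTokensT s) := pvStepLt 'Y' ['y','y','y','y'] [('y', ['y','y']), ('m', ['M','M']), ('d', ['d','d']), ('H', ['H','H']), ('k', ['H']), ('I', ['h','h']), ('l', ['h']), ('i', ['m','m']), ('M', ['m','m']), ('s', ['s','s']), ('p', ['t','t']), ('b', ['M','M','M'])] (by decide) (by decide) (by decide) (by decide) (by decide) (by decide) (s).length (s) le_rfl hbY
  · have hbm2 : ['%','%','m'] <:+: pvF2 s := by
      have h1 := pvBadmFwd 'Y' ['y','y','y','y'] (by decide) (by decide) s.length s le_rfl hbm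
      exact pvBadmFwd 'y' ['y','y'] (by decide) (by decide) (pvF1 s).length (pvF1 s) le_rfl h1
    calc pvPc (pvF13 s)
      = pvPc (pvScanT [] (pvF13 s)) := by rw [pvScanT_nil_table]
    _ ≤ pvPc (pvScanT [('b', ['M','M','M'])] (pvF12 s)) := pvStepLe 'b' ['M','M','M'] [] (by decide) (by decide) (by decide) (by decide) (by decide) (pvF12 s).length (pvF12 s) le_rfl
    _ ≤ pvPc (pvScanT [('p', ['t','t']), ('b', ['M','M','M'])] (pvF11 s)) := pvStepLe 'p' ['t','t'] [('b', ['M','M','M'])] (by decide) (by decide) (by decide) (by decide) (by decide) (pvF11 s).length (pvF11 s) le_rfl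
    _ ≤ pvPc (pvScanT [('s', ['s','s']), ('p', ['t','t']), ('b', ['M','M','M'])] (pvF10 s)) := pvStepLe 's' ['s','s'] [('p', ['t','t']), ('b', ['M','M','M'])] (by decide) (by decide) (by decide) (by decide) (by decide) (pvF10 s).length (pvF10 s) le_rfl
    _ ≤ pvPc (pvScanT [('M', ['m','m']), ('s', ['s','s']), ('p', ['t','t']), ('b', ['M','M','M'])] (pvF9 s)) := pvStepLe 'M' ['m','m'] [('s', ['s','s']), ('p', ['t','t']), ('b', ['M','M','M'])] (by decide) (by decide) (by decide) (by decide) (by decide) (pvF9 s).length (pvF9 s) le_rfl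
    _ ≤ pvPc (pvScanT [('i', ['m','m']), ('M', ['m','m']), ('s', ['s','s']), ('p', ['t','t']), ('b', ['M','M','M'])] (pvF8 s)) := pvStepLe 'i' ['m','m'] [('M', ['m','m']), ('s', ['s','s']), ('p', ['t','t']), ('b', ['M','M','M'])] (by decide) (by decide) (by decide) (by decide) (by decide) (pvF8 s).length (pvF8 s) le_rfl
    _ ≤ pvPc (pvScanT [('l', ['h']), ('i', ['m','m']), ('M', ['m','m']), ('s', ['s','s']), ('p', ['t','t']), ('b', ['M','M','M'])] (pvF7 s)) := pvStepLe 'l' ['h'] [('i', ['m','m']), ('M', ['m','m']), ('s', ['s','s']), ('p', ['t','t']), ('b', ['M','M','M'])] (by decide) (by decide) (by decide) (by decide) (by decide) (pvF7 s).length (pvF7 s) le_rfl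
    _ ≤ pvPc (pvScanT [('I', ['h','h']), ('l', ['h']), ('i', ['m','m']), ('M', ['m','m']), ('s', ['s','s']), ('p', ['t','t']), ('b', ['M','M','M'])] (pvF6 s)) := pvStepLe 'I' ['h','h'] [('l', ['h']), ('i', ['m','m']), ('M', ['m','m']), ('s', ['s','s']), ('p', ['t','t']), ('b', ['M','M','M'])] (by decide) (by decide) (by decide) (by decide) (by decide) (pvF6 s).length (pvF6 s) le_rfl
    _ ≤ pvPc (pvScanT [('k', ['H']), ('I', ['h','h']), ('l', ['h']), ('i', ['m','m']), ('M', ['m','m']), ('s', ['s','s']), ('p', ['t','t']), ('b', ['M','M','M'])] (pvF5 s)) := pvStepLe 'k' ['H'] [('I', ['h','h']), ('l', ['h']), ('i', ['m','m']), ('M', ['m','m']), ('s', ['s','s']), ('p', ['t','t']), ('b', ['M','M','M'])] (by decide) (by decide) (by decide) (by decide) (by decide) (pvF5 s).length (pvF5 s) le_rfl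
    _ ≤ pvPc (pvScanT [('H', ['H','H']), ('k', ['H']), ('I', ['h','h']), ('l', ['h']), ('i', ['m','m']), ('M', ['m','m']), ('s', ['s','s']), ('p', ['t','t']), ('b', ['M','M','M'])] (pvF4 s)) := pvStepLe 'H' ['H','H'] [('k', ['H']), ('I', ['h','h']), ('l', ['h']), ('i', ['m','m']), ('M', ['m','m']), ('s', ['s','s']), ('p', ['t','t']), ('b', ['M','M','M'])] (by decide) (by decide) (by decide) (by decide) (by decide) (pvF4 s).length (pvF4 s) le_rfl
    _ ≤ pvPc (pvScanT [('d', ['d','d']), ('H', ['H','H']), ('k', ['H']), ('I', ['h','h']), ('l', ['h']), ('i', ['m','m']), ('M', ['m','m']), ('s', ['s','s']), ('p', ['t','t']), ('b', ['M','M','M'])] (pvF3 s)) := pvStepLe 'd' ['d','d'] [('H', ['H','H']), ('k', ['H']), ('I', ['h','h']), ('l', ['h']), ('i', ['m','m']), ('M', ['m','m']), ('s', ['s','s']), ('p', ['t','t']), ('b', ['M','M','M'])] (by decide) (by decide) (by decide) (by decide) (by decide) (pvF3 s).length (pvF3 s) le_rfl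
    _ < pvPc (pvScanT [('m', ['M','M']), ('d', ['d','d']), ('H', ['H','H']), ('k', ['H']), ('I', ['h','h']), ('l', ['h']), ('i', ['m','m']), ('M', ['m','m']), ('s', ['s','s']), ('p', ['t','t']), ('b', ['M','M','M'])] (pvF2 s)) := pvStepLt 'm' ['M','M'] [('d', ['d','d']), ('H', ['H','H']), ('k', ['H']), ('I', ['h','h']), ('l', ['h']), ('i', ['m','m']), ('M', ['m','m']), ('s', ['s','s']), ('p', ['t','t']), ('b', ['M','M','M'])] (by decide) (by decide) (by decide) (by decide) (by decide) (by decide) (pvF2 s).length (pvF2 s) le_rfl hbm2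
    _ ≤ pvPc (pvScanT [('y', ['y','y']), ('m', ['M','M']), ('d', ['d','d']), ('H', ['H','H']), ('k', ['H']), ('I', ['h','h']), ('l', ['h']), ('i', ['m','m']), ('M', ['m','m']), ('s', ['s','s']), ('p', ['t','t']), ('b', ['M','M','M'])] (pvF1 s)) := pvStepLe 'y' ['y','y'] [('m', ['M','M']), ('d', ['d','d']), ('H', ['H','H']), ('k', ['H']), ('I', ['h','h']), ('l', ['h']), ('i', ['m','m']), ('M', ['m','m']), ('s', ['s','s']), ('p', ['t','t']), ('b', ['M','M','M'])] (by decide) (by decide) (by decide) (by decide) (by decide) (pvF1 s).length (pvF1 s) le_rfl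
    _ ≤ pvPc (pvScanT pvTokensT s) := pvStepLe 'Y' ['y','y','y','y'] [('y', ['y','y']), ('m', ['M','M']), ('d', ['d','d']), ('H', ['H','H']), ('k', ['H']), ('I', ['h','h']), ('l', ['h']), ('i', ['m','m']), ('M', ['m','m']), ('s', ['s','s']), ('p', ['t','t']), ('b', ['M','M','M'])] (by decide) (by decide) (by decide) (by decide) (by decide) (s).length (s) le_rfl

lemma pvCount_dropWhile_space (l : List Char) :
    List.count '%' (List.dropWhile PySem.Chars.isspace l) = List.count '%' l := by
  induction l with
  | nil => simp
  | cons a t ih =>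
    by_cases h : PySem.Chars.isspace a = true
    · have ha : (a == '%') = false := by
        rw [beq_eq_false_iff_ne]
        intro he; subst he; revert h; decide
      simp [List.dropWhile_cons, h, ih, List.count_cons, ha]
    · simp [List.dropWhile_cons, h]

lemma pvPc_strip (l : List Char) : pvPc (PySem.Chars.strip l) = pvPc l := by
  simp [pvPc, PySem.Chars.strip, PySem.Chars.rstrip, PySem.Chars.lstrip,
    pvCount_dropWhile_space, List.count_reverse]

lemma pvCombinedPc (x y : String) :
    pvPc (if PySem.Str.strip (x ++ " " ++ y) = "" then ("dd.MM.yyyy HH:mm" : String)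
          else PySem.Str.strip (x ++ " " ++ y)).toList =
      pvPc x.toList + pvPc y.toList := by
  have hs : pvPc (PySem.Str.strip (x ++ " " ++ y)).toList =
      pvPc x.toList + pvPc y.toList := by
    rw [PySem.Str.toList_strip, pvPc_strip]
    simp only [String.toList_append, pvPc_append]
    have : pvPc (" " : String).toList = 0 := by decide
    omega
  by_cases h : PySem.Str.strip (x ++ " " ++ y) = ""
  · rw [if_pos h]
    rw [h] at hs
    have h0 : pvPc ("" : String).toList = 0 := by decide
    have hFB : pvPc ("dd.MM.yyyy HH:mm" : String).toList = 0 := by decide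
    omega
  · rw [if_neg h]; exact hs

lemma pvEffBad (o : Option String) (dflt : String) (p : List Char) (hp : p ≠ [])
    (h : p <:+: (o.getD "").toList) : p <:+: (pvEff o dflt).toList := by
  cases o with
  | none =>
    simp only [Option.getD] at h
    have := h.length_le
    cases p with
    | nil => exact absurd rfl hp
    | cons x xs => simp at this
  | some s =>
    simp only [Option.getD] at h
    by_cases hs : s = ""
    · subst hs
      have := h.length_le
      cases p with
      | nil => exact absurd rfl hp
      | cons x xs => simp at this
    · simpa [pvEff, hs] using h

-- ===== VERDICT (by name: the statement is the Claim_ definition above) =====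
theorem convert_php_datetime_format_spec : Claim_unchanged_convert_php_datetime_format := by
  intro date_format time_format _ hnD
  obtain ⟨⟨g1, g2⟩, g3, g4⟩ :
      (¬ (['%','%','Y'] <:+: (date_format.getD "").toList) ∧
       ¬ (['%','%','m'] <:+: (date_format.getD "").toList)) ∧
      (¬ (['%','%','Y'] <:+: (time_format.getD "").toList) ∧
       ¬ (['%','%','m'] <:+: (time_format.getD "").toList)) := by
    unfold D_convert_php_datetime_format at hnD
    simp only [Bool.or_eq_true, not_or, PySem.Chars.isIn_iff_infix] at hnD
    tauto
  have hEff : ∀ (o : Option String) (dflt : String),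
      ¬ (['%','%','Y'] <:+: dflt.toList) → ¬ (['%','%','m'] <:+: dflt.toList) →
      ¬ (['%','%','Y'] <:+: (o.getD "").toList) → ¬ (['%','%','m'] <:+: (o.getD "").toList) →
      (¬ (['%','%','Y'] <:+: (pvEff o dflt).toList) ∧
       ¬ (['%','%','m'] <:+: (pvEff o dflt).toList)) := by
    intro o dflt hdY hdm hoY hom
    cases o with
    | none => exact ⟨hdY, hdm⟩
    | some s =>
      by_cases hs : s = "" <;> simp [pvEff, hs] at hoY hom ⊢ <;> exact ⟨by assumption, by assumption⟩
  obtain ⟨h1, h2⟩ := hEff date_format "%d.%m.%Y" (by decide) (by decide) g1 g2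
  obtain ⟨h3, h4⟩ := hEff time_format "%H:%M" (by decide) (by decide) g3 g4
  have hdf := pvReplTokens_eq (pvEff date_format "%d.%m.%Y") h1 h2
  have htf := pvReplTokens_eq (pvEff time_format "%H:%M") h3 h4
  show convert_php_datetime_format date_format time_format =
    convert_php_datetime_format_alt date_format time_format
  cases date_format with
  | none =>
    cases time_format with
    | none =>
      simp only [pvEff] at hdf htf
      simp only [convert_php_datetime_format, convert_php_datetime_format_alt]
      rw [hdf, htf]
    | some ts =>
      simp only [pvEff] at hdf htf
      simp only [convert_php_datetime_format, convert_php_datetime_format_alt]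
      by_cases hts : ts = "" <;> simp only [hts, reduceIte] at htf ⊢ <;> rw [hdf, htf]
  | some ds =>
    cases time_format with
    | none =>
      simp only [pvEff] at hdf htf
      simp only [convert_php_datetime_format, convert_php_datetime_format_alt]
      by_cases hds : ds = "" <;> simp only [hds, reduceIte] at hdf ⊢ <;> rw [hdf, htf]
    | some ts =>
      simp only [pvEff] at hdf htf
      simp only [convert_php_datetime_format, convert_php_datetime_format_alt]
      by_cases hds : ds = "" <;> by_cases hts : ts = "" <;>
        simp only [hds, hts, reduceIte] at hdf htf ⊢ <;> rw [hdf, htf]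

set_option maxRecDepth 40000 in
theorem convert_php_datetime_format_changed : Claim_changed_convert_php_datetime_format := by
  unfold Claim_changed_convert_php_datetime_format; decide

theorem convert_php_datetime_format_tight : Claim_exact_convert_php_datetime_format := by
  intro date_format time_format _ hD heq
  unfold D_convert_php_datetime_format at hD
  simp only [Bool.or_eq_true, PySem.Chars.isIn_iff_infix] at hD
  have hpc : pvPc (convert_php_datetime_format date_format time_format).toList =
      pvPc (convert_php_datetime_format_alt date_format time_format).toList := by rw [heq]
  have hAeq : convert_php_datetime_format date_format time_format =
      (if PySem.Str.strip (pvReplaceTokensA (pvEff date_format "%d.%m.%Y") ++ " " ++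
          pvReplaceTokensA (pvEff time_format "%H:%M")) = "" then ("dd.MM.yyyy HH:mm" : String)
        else PySem.Str.strip (pvReplaceTokensA (pvEff date_format "%d.%m.%Y") ++ " " ++
          pvReplaceTokensA (pvEff time_format "%H:%M"))) := rfl
  have hBeq : convert_php_datetime_format_alt date_format time_format =
      (if PySem.Str.strip (pvReplaceTokensB (pvEff date_format "%d.%m.%Y") ++ " " ++
          pvReplaceTokensB (pvEff time_format "%H:%M")) = "" then ("dd.MM.yyyy HH:mm" : String)
        else PySem.Str.strip (pvReplaceTokensB (pvEff date_format "%d.%m.%Y") ++ " " ++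
          pvReplaceTokensB (pvEff time_format "%H:%M"))) := rfl
  rw [hAeq, hBeq, pvCombinedPc, pvCombinedPc] at hpc
  simp only [pvReplaceTokensA_toList, pvReplaceTokensB_toList] at hpc
  have leD := pvPcLe13 (pvEff date_format "%d.%m.%Y").toList
  have leT := pvPcLe13 (pvEff time_format "%H:%M").toList
  rcases hD with ((hY | hm) | hY) | hm
  · have := pvPcLt13 (pvEff date_format "%d.%m.%Y").toList
      (Or.inl (pvEffBad date_format "%d.%m.%Y" _ (by decide) hY))
    omega
  · have := pvPcLt13 (pvEff date_format "%d.%m.%Y").toList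
      (Or.inr (pvEffBad date_format "%d.%m.%Y" _ (by decide) hm))
    omega
  · have := pvPcLt13 (pvEff time_format "%H:%M").toList
      (Or.inl (pvEffBad time_format "%H:%M" _ (by decide) hY))
    omega
  · have := pvPcLt13 (pvEff time_format "%H:%M").toList
      (Or.inr (pvEffBad time_format "%H:%M" _ (by decide) hm))
    omega
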